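-- pv_equiv track=rewrite | github.com/triyys/training-python-syntax | bai59.py | max_digit_col
-- ===== SOURCE A (Python) =====
-- def digit_count(n: int) -> int:
--     result = 0
--
--     while n > 0:
--         result += 1
--         n = n // 10
--
--     return result
--
-- def array_digit_count(arr: list[int]) -> int:
--     result = 0
--
--     for element in arr:
--         result += digit_count(element)
--
--     return result
--
-- def max_digit_col(matrix: list[list[int]]) -> list[int]:
--     max_value = 0
--     result = []
--
--     for i in range(len(matrix[0])):
--         col = [row[i] for row in matrix]
--
--         col_digit_count = array_digit_count(col)
--
--         if col_digit_count > max_value: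
--             max_value = col_digit_count
--             result = col
--
--     return result
-- ===== SOURCE B (Python) =====
-- def digit_count(n: int) -> int:
--     return 0 if n <= 0 else 1 + digit_count(n // 10)
--
-- def max_digit_col(matrix: list[list[int]]) -> list[int]:
--     ncols = len(matrix[0])
--     counts = [0] * ncols
--     for row in matrix:
--         counts = [c + digit_count(x) for c, x in zip(counts, row)]
--     best, idx = 0, 0
--     for i, c in enumerate(counts):
--         if c > best:
--             best, idx = c, i
--     if best > 0:
--         return [row[idx] for row in matrix]
--     return []
-- ===== Notes on version B (the rewrite author's own statement) =====
-- stated objective: alternative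
-- what changed: Replaces A's column-major loop (extracting and recounting a fresh column list per index) with a single row-major pass that builds a per-column digit-count table, then one scan of that table for the first strict maximum, rebuilding the winning column only once at the end.
import Mathlib
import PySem

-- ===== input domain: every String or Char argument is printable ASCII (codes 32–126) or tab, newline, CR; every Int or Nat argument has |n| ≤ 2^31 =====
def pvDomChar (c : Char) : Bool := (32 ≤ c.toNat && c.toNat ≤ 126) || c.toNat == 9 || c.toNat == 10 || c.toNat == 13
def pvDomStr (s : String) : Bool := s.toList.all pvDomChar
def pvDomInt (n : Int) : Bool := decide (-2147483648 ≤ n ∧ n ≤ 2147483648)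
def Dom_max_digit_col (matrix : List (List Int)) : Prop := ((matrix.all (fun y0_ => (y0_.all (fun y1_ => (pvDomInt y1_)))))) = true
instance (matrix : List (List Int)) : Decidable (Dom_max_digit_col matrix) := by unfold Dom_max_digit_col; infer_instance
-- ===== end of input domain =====

-- B replaces A's per-column re-extraction and recount with one row-major counts-table pass
-- plus a single scan for the first strict maximum (objective: alternative; same cost).


-- ===== PORT A =====
def pvDigitCountA (n : Int) : Int :=
  if 0 < n then 1 + pvDigitCountA (PySem.Int.floordiv n 10) else 0
termination_by n.toNat
decreasing_by
  simp only [PySem.Int.floordiv_eq_ediv_of_pos (by norm_num : (0:Int) < 10)]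
  omega

def pvArrayDigitCount (arr : List Int) : Int :=
  arr.foldl (fun r e => r + pvDigitCountA e) 0

def max_digit_col (matrix : List (List Int)) : List Int :=
  ((PySem.List.pyRange 0 (PySem.List.len (PySem.List.pyGetD matrix 0 [])) 1).foldl
    (fun (st : Int × List Int) i =>
      let col := matrix.map (fun row => PySem.List.pyGetD row i 0)
      let c := pvArrayDigitCount col
      if c > st.1 then (c, col) else st) ((0 : Int), ([] : List Int))).2

-- ===== PORT B =====
def pvDigitCountB (n : Int) : Int :=
  if n ≤ 0 then 0 else 1 + pvDigitCountB (PySem.Int.floordiv n 10)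
termination_by n.toNat
decreasing_by
  simp only [PySem.Int.floordiv_eq_ediv_of_pos (by norm_num : (0:Int) < 10)]
  omega

def max_digit_col_alt (matrix : List (List Int)) : List Int :=
  let ncols := PySem.List.len (PySem.List.pyGetD matrix 0 [])
  let counts : List Int :=
    matrix.foldl (fun cs row => (cs.zip row).map (fun p => p.1 + pvDigitCountB p.2))
      (List.replicate ncols.toNat (0 : Int))
  let st :=
    (PySem.List.enumerate counts 0).foldl
      (fun (st : Int × Int) p => if p.2 > st.1 then (p.2, p.1) else st) ((0 : Int), (0 : Int))
  if st.1 > 0 then matrix.map (fun row => PySem.List.pyGetD row st.2 0) else []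

-- ===== PRECONDITION & SPEC =====
-- Pre_ excludes exactly the inputs where A raises IndexError: the empty matrix (matrix[0])
-- and ragged matrices whose later rows are shorter than row 0 (row[i]).
def Pre_max_digit_col (matrix : List (List Int)) : Prop :=
  matrix ≠ [] ∧ ∀ row ∈ matrix, (matrix.headD []).length ≤ row.length
instance (matrix : List (List Int)) : Decidable (Pre_max_digit_col matrix) := by
  unfold Pre_max_digit_col; infer_instance
def pvWitness_max_digit_col : List (List Int) := [[1, 22], [333, 4]]
def Spec_max_digit_col (matrix : List (List Int)) (out : List Int) : Prop := out = max_digit_col_alt matrix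
instance (matrix : List (List Int)) (out : List Int) : Decidable (Spec_max_digit_col matrix out) := by unfold Spec_max_digit_col; infer_instance

-- ===== CLAIM (what is proved, stated in full; the proofs are below) =====
def Claim_equal_max_digit_col : Prop := ∀ (matrix : List (List Int)), Dom_max_digit_col matrix → Pre_max_digit_col matrix → Spec_max_digit_col matrix (max_digit_col matrix)

-- ===== LEMMAS AND PROOFS =====

-- the two digit counters agree
theorem pvDigitCount_eq (n : Int) : pvDigitCountB n = pvDigitCountA n := by
  induction n using pvDigitCountA.induct with
  | case1 n h ih => rw [pvDigitCountA, pvDigitCountB, if_pos h, if_neg (by omega), ih]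
  | case2 n h => rw [pvDigitCountA, pvDigitCountB, if_neg h, if_pos (by omega)]

-- column i of the matrix, as both ports form it
def pvCol (matrix : List (List Int)) (i : Int) : List Int :=
  matrix.map (fun row => PySem.List.pyGetD row i 0)

-- total digit count of column i
def pvCnt (matrix : List (List Int)) (i : Int) : Int :=
  matrix.foldl (fun s row => s + pvDigitCountA (PySem.List.pyGetD row i 0)) 0

theorem pvArrayDigitCount_col (matrix : List (List Int)) (i : Int) :
    pvArrayDigitCount (matrix.map (fun row => PySem.List.pyGetD row i 0)) = pvCnt matrix i := by
  simp [pvArrayDigitCount, pvCnt, List.foldl_map]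

-- B's counts-table fold: length is preserved and entry k accumulates column k's digit count
theorem pvCounts_spec (rows : List (List Int)) :
    ∀ (cs : List Int), (∀ r ∈ rows, cs.length ≤ r.length) →
    (rows.foldl (fun cs row => (cs.zip row).map (fun p => p.1 + pvDigitCountB p.2)) cs).length = cs.length ∧
    ∀ k : Nat, k < cs.length →
      (rows.foldl (fun cs row => (cs.zip row).map (fun p => p.1 + pvDigitCountB p.2)) cs).getD k 0
        = cs.getD k 0 + rows.foldl (fun s row => s + pvDigitCountA (PySem.List.pyGetD row (k : Int) 0)) 0 := by
  induction rows with
  | nil => intro cs _; simp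
  | cons row rows ih =>
    intro cs h
    have hlen : cs.length ≤ row.length := h row (List.mem_cons_self ..)
    have hstep : ((cs.zip row).map (fun p => p.1 + pvDigitCountB p.2)).length = cs.length := by
      simp [List.length_zip]; omega
    obtain ⟨ihl, ihg⟩ := ih ((cs.zip row).map (fun p => p.1 + pvDigitCountB p.2))
      (by intro r hr; rw [hstep]; exact h r (List.mem_cons_of_mem _ hr))
    refine ⟨by simpa [hstep] using ihl, ?_⟩
    intro k hk
    rw [List.foldl_cons, ihg k (by omega)]
    have hk2 : k < (cs.zip row).length := by simp [List.length_zip]; omega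
    have hgs : ((cs.zip row).map (fun p => p.1 + pvDigitCountB p.2)).getD k 0
        = cs.getD k 0 + pvDigitCountA (PySem.List.pyGetD row (k : Int) 0) := by
      rw [List.getD_eq_getElem _ _ (by simpa using hk2), List.getElem_map, List.getElem_zip,
        pvDigitCount_eq, List.getD_eq_getElem _ _ hk]
      congr 1
      rw [PySem.List.pyGetD_natCast, List.getD_eq_getElem _ _ (by omega)]
    rw [hgs, List.foldl_cons]
    simp only [PySem.List.foldl_add]
    ring

-- simulation: A's fold carries (max, column), B's scan carries (max, index)
theorem pvSim (cnt : Int → Int) (colF : Int → List Int) (l : List Int) :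
    ∀ (m : Int) (r : List Int) (i : Int), 0 ≤ m → r = (if 0 < m then colF i else []) →
    (l.foldl (fun st j => if cnt j > st.1 then (cnt j, colF j) else st) (m, r)).1
      = (l.foldl (fun st j => if cnt j > st.1 then (cnt j, j) else st) (m, i)).1 ∧
    0 ≤ (l.foldl (fun st j => if cnt j > st.1 then (cnt j, j) else st) (m, i)).1 ∧
    (l.foldl (fun st j => if cnt j > st.1 then (cnt j, colF j) else st) (m, r)).2
      = (if 0 < (l.foldl (fun st j => if cnt j > st.1 then (cnt j, j) else st) (m, i)).1
         then colF (l.foldl (fun st j => if cnt j > st.1 then (cnt j, j) else st) (m, i)).2 else []) := by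
  induction l with
  | nil => intro m r i hm hr; exact ⟨rfl, hm, hr⟩
  | cons j l ih =>
    intro m r i hm hr
    by_cases hc : cnt j > m
    · simpa [hc] using ih (cnt j) (colF j) j (by omega) (by rw [if_pos (by omega)])
    · simpa [hc] using ih m r i hm hr

-- ===== VERDICT (by name: the statement is the Claim_ definition above) =====
theorem max_digit_col_spec : Claim_equal_max_digit_col := by
  intro matrix _ hpre
  obtain ⟨hne, hrows⟩ := hpre
  unfold Spec_max_digit_col
  set n : Nat := (matrix.headD []).length with hn
  have hhead : PySem.List.pyGetD matrix 0 [] = matrix.headD [] := by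
    cases matrix with
    | nil => simp at hne
    | cons a t => simp [PySem.List.pyGetD_zero_cons]
  have hlen : PySem.List.len (PySem.List.pyGetD matrix 0 []) = (n : Int) := by
    simp [hhead, hn]
  simp only [max_digit_col, max_digit_col_alt, hlen]
  set C : List Int :=
    matrix.foldl (fun cs row => (cs.zip row).map (fun p => p.1 + pvDigitCountB p.2))
      (List.replicate ((n : Int)).toNat (0 : Int)) with hC
  obtain ⟨hcl, hcg⟩ := pvCounts_spec matrix (List.replicate ((n : Int)).toNat (0 : Int))
    (by intro r hr; simpa using hrows r hr)
  have hclen : C.length = n := by rw [hC]; simpa using hcl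
  have hcget : ∀ k : Nat, k < n → C.getD k 0 = pvCnt matrix (k : Int) := by
    intro k hk
    rw [hC, hcg k (by simpa using hk)]
    simp [pvCnt, hk]
  have hlenC : PySem.List.len C = (n : Int) := by simp [hclen]
  rw [PySem.List.enumerate_eq_map_pyRange C 0, List.foldl_map, hlenC]
  have hcongrB : (PySem.List.pyRange 0 (n : Int) 1).foldl
      (fun (st : Int × Int) j =>
        (fun (st : Int × Int) (p : Int × Int) => if p.2 > st.1 then (p.2, p.1) else st) st
          (j, PySem.List.pyGetD C j 0)) ((0:Int), (0:Int))
      = (PySem.List.pyRange 0 (n : Int) 1).foldl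
      (fun (st : Int × Int) j => if pvCnt matrix j > st.1 then (pvCnt matrix j, j) else st) ((0:Int), (0:Int)) := by
    apply PySem.List.foldl_congr_mem
    intro acc x hx
    have hx' := (PySem.List.mem_pyRange_one).1 hx
    have hcx : PySem.List.pyGetD C x 0 = pvCnt matrix x := by
      have h1 : x = ((x.toNat : Nat) : Int) := by omega
      rw [h1, PySem.List.pyGetD_natCast, hcget x.toNat (by omega)]
    simp only [hcx]
  have hcongrA : (PySem.List.pyRange 0 (n : Int) 1).foldl
      (fun (st : Int × List Int) i =>
        let col := matrix.map (fun row => PySem.List.pyGetD row i 0)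
        let c := pvArrayDigitCount col
        if c > st.1 then (c, col) else st) ((0:Int), ([] : List Int))
      = (PySem.List.pyRange 0 (n : Int) 1).foldl
      (fun (st : Int × List Int) j => if pvCnt matrix j > st.1 then (pvCnt matrix j, pvCol matrix j) else st) ((0:Int), ([] : List Int)) := by
    apply PySem.List.foldl_congr_mem
    intro acc x _
    simp only [pvArrayDigitCount_col]
    rfl
  rw [hcongrA, hcongrB]
  obtain ⟨h1, h2, h3⟩ := pvSim (pvCnt matrix) (pvCol matrix) (PySem.List.pyRange 0 (n : Int) 1)
    0 [] 0 le_rfl (by simp)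
  rw [h3]
  by_cases hpos : 0 < (((PySem.List.pyRange 0 (n : Int) 1).foldl
      (fun (st : Int × Int) j => if pvCnt matrix j > st.1 then (pvCnt matrix j, j) else st) ((0:Int), (0:Int))).1)
  · rw [if_pos hpos, if_pos hpos]; rfl
  · rw [if_neg hpos, if_neg hpos]
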